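-- pv_equiv track=rewrite | github.com/niveditaprity/DSA-Bootcamp | JyotiKumari/GFG_30_DOC/Dam of Candies.py | maxCandy
-- ===== SOURCE A (Python) =====
-- def maxCandy(height, n):
--     # Your code goes here
--     if(n==1 or n==2):
--         return 0
--     front = 0
--     tail = n-1
--     ans=0
--     while(front<tail):
--         ans = max(ans, (tail-front-1)*(min(height[front], height[tail])))
--         if height[front]>height[tail]:
--             tail-=1
--         elif height[front]<height[tail]:
--             front+=1
--         else:
--             front+=1
--             tail-=1
--     return ans
-- ===== SOURCE B (Python) =====
-- def maxCandy(height, n):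
--     # Simpler brute force: examine every wall pair (i, j), i < j, among the first
--     # n walls; candies trapped between them = (j - i - 1) * min(height[i], height[j]).
--     ans = 0
--     for i in range(n):
--         for j in range(i + 1, n):
--             ans = max(ans, (j - i - 1) * min(height[i], height[j]))
--     return ans
-- ===== Notes on version B (the rewrite author's own statement) =====
-- stated objective: simpler
-- what changed: Replaces the converging two-pointer sweep (with its n==1/n==2 guard) by a plain all-pairs double loop taking max over (j-i-1)*min(height[i],height[j]); the loops naturally yield 0 for n<=2.
-- outside the precondition, e.g. on maxCandy([], 2): A returns 0, B raises IndexError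
import Mathlib
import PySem

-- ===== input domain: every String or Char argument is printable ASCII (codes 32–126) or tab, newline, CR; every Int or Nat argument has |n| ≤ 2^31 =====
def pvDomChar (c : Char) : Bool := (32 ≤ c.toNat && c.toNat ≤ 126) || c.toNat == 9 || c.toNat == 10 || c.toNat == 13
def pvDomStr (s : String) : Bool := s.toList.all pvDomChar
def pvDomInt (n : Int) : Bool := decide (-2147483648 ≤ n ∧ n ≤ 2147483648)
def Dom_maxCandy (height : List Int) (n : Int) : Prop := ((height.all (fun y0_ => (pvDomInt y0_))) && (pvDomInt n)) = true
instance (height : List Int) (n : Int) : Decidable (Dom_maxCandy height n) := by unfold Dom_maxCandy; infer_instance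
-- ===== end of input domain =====

-- B replaces the two-pointer sweep by a plain all-pairs double loop (simpler, same results; not faster).

-- height[i]; on Pre_ every index used by either port is in range, so the default 0 is never taken
def pvGet (height : List Int) (i : Int) : Int := (PySem.List.pyGet? height i).getD 0

-- ===== PORT A =====
-- the while loop of A, state (front, tail, ans)
def maxCandyLoop (height : List Int) (front tail ans : Int) : Int :=
  if _h : front < tail then
    let a := max ans ((tail - front - 1) * min (pvGet height front) (pvGet height tail))
    if pvGet height front > pvGet height tail then
      maxCandyLoop height front (tail - 1) a
    else if pvGet height front < pvGet height tail then
      maxCandyLoop height (front + 1) tail a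
    else
      maxCandyLoop height (front + 1) (tail - 1) a
  else ans
termination_by (tail - front).toNat
decreasing_by all_goals omega

def maxCandy (height : List Int) (n : Int) : Int :=
  if n = 1 ∨ n = 2 then 0
  else maxCandyLoop height 0 (n - 1) 0

-- ===== PORT B =====
def maxCandy_alt (height : List Int) (n : Int) : Int :=
  (PySem.List.pyRange 0 n 1).foldl
    (fun ans i =>
      (PySem.List.pyRange (i + 1) n 1).foldl
        (fun a j => max a ((j - i - 1) * min (pvGet height i) (pvGet height j))) ans)
    0

-- ===== PRECONDITION & SPEC =====
-- Pre_ excludes exactly n = 2 with fewer than two walls (where A's guard returns 0 but B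
-- indexes height[0..1] and raises) and n ≥ 3 with n > len(height) (where A itself raises).
def Pre_maxCandy (height : List Int) (n : Int) : Prop := n ≤ (height.length : Int) ∨ n ≤ 1
instance (height : List Int) (n : Int) : Decidable (Pre_maxCandy height n) := by unfold Pre_maxCandy; infer_instance
def pvWitness_maxCandy : List Int × Int := ([3, 1, 2, 4], 4)

def Spec_maxCandy (height : List Int) (n : Int) (out : Int) : Prop := out = maxCandy_alt height n
instance (height : List Int) (n : Int) (out : Int) : Decidable (Spec_maxCandy height n out) := by unfold Spec_maxCandy; infer_instance

-- ===== CLAIM (what is proved, stated in full; the proofs are below) =====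
def Claim_equal_maxCandy : Prop := ∀ (height : List Int) (n : Int), Dom_maxCandy height n → Pre_maxCandy height n → Spec_maxCandy height n (maxCandy height n)

-- ===== LEMMAS AND PROOFS =====

-- candies trapped by the pair of walls (i, j)
def pvProd (height : List Int) (i j : Int) : Int :=
  (j - i - 1) * min (pvGet height i) (pvGet height j)

lemma pvProd_le_max (w w' m m' : Int) (h0 : 0 ≤ w) (hw : w ≤ w') (hm : m ≤ m') :
    w * m ≤ max 0 (w' * m') := by
  by_cases h : 0 ≤ m'
  · exact le_max_of_le_right (by nlinarith)
  · exact le_max_of_le_left (by nlinarith)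

-- the loop result dominates its initial accumulator
lemma loop_ge_ans (height : List Int) (front tail ans : Int) :
    ans ≤ maxCandyLoop height front tail ans := by
  fun_induction maxCandyLoop height front tail ans with
  | case1 f t a hlt la hc ih => exact le_trans (le_max_left _ _) ih
  | case2 f t a hlt la hc1 hc2 ih => exact le_trans (le_max_left _ _) ih
  | case3 f t a hlt la hc1 hc2 ih => exact le_trans (le_max_left _ _) ih
  | case4 f t a hlt => exact le_refl a

-- upper bound: the loop only takes maxima of ans and pair products inside [front, tail]
lemma loop_le (height : List Int) (front tail ans c : Int)
    (hans : ans ≤ c)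
    (hp : ∀ i j, front ≤ i → i < j → j ≤ tail → pvProd height i j ≤ c) :
    maxCandyLoop height front tail ans ≤ c := by
  fun_induction maxCandyLoop height front tail ans generalizing c with
  | case1 f t a hlt la hc ih =>
      exact ih c (max_le hans (hp f t le_rfl hlt le_rfl))
        (fun i j hi hij hj => hp i j hi hij (by omega))
  | case2 f t a hlt la hc1 hc2 ih =>
      exact ih c (max_le hans (hp f t le_rfl hlt le_rfl))
        (fun i j hi hij hj => hp i j (by omega) hij hj)
  | case3 f t a hlt la hc1 hc2 ih =>
      exact ih c (max_le hans (hp f t le_rfl hlt le_rfl))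
        (fun i j hi hij hj => hp i j (by omega) hij (by omega))
  | case4 f t a hlt => exact hans

-- lower bound (two-pointer dominance): with a nonnegative accumulator the loop
-- result dominates the product of EVERY pair inside the current window
lemma loop_ge_prod (height : List Int) (front tail ans : Int) (h0 : 0 ≤ ans) :
    ∀ i j, front ≤ i → i < j → j ≤ tail → pvProd height i j ≤ maxCandyLoop height front tail ans := by
  fun_induction maxCandyLoop height front tail ans with
  | case1 f t a hlt la hc ih =>
      -- height[f] > height[t]: tail moves; pairs ( _, t) are dominated
      intro i j hi hij hj
      have ha0 : 0 ≤ max a ((t - f - 1) * min (pvGet height f) (pvGet height t)) :=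
        le_trans h0 (le_max_left _ _)
      by_cases hjt : j = t
      · subst hjt
        have key : pvProd height i j ≤ max 0 ((j - f - 1) * min (pvGet height f) (pvGet height j)) := by
          apply pvProd_le_max <;> omega
        refine le_trans key (le_trans ?_ (loop_ge_ans _ _ _ _))
        exact max_le ha0 (le_max_right _ _)
      · exact ih ha0 i j hi hij (by omega)
  | case2 f t a hlt la hc1 hc2 ih =>
      -- height[f] < height[t]: front moves; pairs (f, _) are dominated
      intro i j hi hij hj
      have ha0 : 0 ≤ max a ((t - f - 1) * min (pvGet height f) (pvGet height t)) :=
        le_trans h0 (le_max_left _ _)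
      by_cases hif : i = f
      · subst hif
        have key : pvProd height i j ≤ max 0 ((t - i - 1) * min (pvGet height i) (pvGet height t)) := by
          apply pvProd_le_max <;> omega
        refine le_trans key (le_trans ?_ (loop_ge_ans _ _ _ _))
        exact max_le ha0 (le_max_right _ _)
      · exact ih ha0 i j (by omega) hij hj
  | case3 f t a hlt la hc1 hc2 ih =>
      -- height[f] = height[t]: both move; pairs touching f or t are dominated
      intro i j hi hij hj
      have ha0 : 0 ≤ max a ((t - f - 1) * min (pvGet height f) (pvGet height t)) :=
        le_trans h0 (le_max_left _ _)
      by_cases hif : i = f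
      · subst hif
        have key : pvProd height i j ≤ max 0 ((t - i - 1) * min (pvGet height i) (pvGet height t)) := by
          apply pvProd_le_max <;> omega
        refine le_trans key (le_trans ?_ (loop_ge_ans _ _ _ _))
        exact max_le ha0 (le_max_right _ _)
      · by_cases hjt : j = t
        · subst hjt
          have key : pvProd height i j ≤ max 0 ((j - f - 1) * min (pvGet height f) (pvGet height j)) := by
            apply pvProd_le_max <;> omega
          refine le_trans key (le_trans ?_ (loop_ge_ans _ _ _ _))
          exact max_le ha0 (le_max_right _ _)
        · exact ih ha0 i j (by omega) hij (by omega)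
  | case4 f t a hlt =>
      intro i j hi hij hj; omega

-- B's inner fold: bounds of a max-accumulating foldl
lemma foldl_max_ge_init (f : Int → Int) (l : List Int) (ans : Int) :
    ans ≤ l.foldl (fun a x => max a (f x)) ans := by
  induction l generalizing ans with
  | nil => exact le_refl ans
  | cons x xs ih => exact le_trans (le_max_left _ _) (ih _)

lemma foldl_max_ge_mem (f : Int → Int) (l : List Int) (x : Int) (hx : x ∈ l) :
    ∀ ans, f x ≤ l.foldl (fun a y => max a (f y)) ans := by
  induction l with
  | nil => cases hx
  | cons y ys ih =>
      intro ans
      rcases List.mem_cons.mp hx with h | h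
      · subst h; exact le_trans (le_max_right _ _) (foldl_max_ge_init f ys _)
      · exact ih h _

lemma foldl_max_le (f : Int → Int) (l : List Int) (c : Int)
    (hl : ∀ x ∈ l, f x ≤ c) :
    ∀ ans, ans ≤ c → l.foldl (fun a x => max a (f x)) ans ≤ c := by
  induction l with
  | nil => exact fun ans hans => hans
  | cons x xs ih =>
      intro ans hans
      exact ih (fun y hy => hl y (List.mem_cons_of_mem _ hy)) _
        (max_le hans (hl x List.mem_cons_self))

-- B as a doubly nested max fold over pvProd
lemma alt_eq (height : List Int) (n : Int) :
    maxCandy_alt height n =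
      (PySem.List.pyRange 0 n 1).foldl
        (fun ans i => (PySem.List.pyRange (i + 1) n 1).foldl
          (fun a j => max a (pvProd height i j)) ans) 0 := by
  unfold maxCandy_alt pvProd
  rfl

lemma alt_ge_init (height : List Int) (n : Int) (l : List Int) (ans : Int) :
    ans ≤ l.foldl (fun a i => (PySem.List.pyRange (i + 1) n 1).foldl
        (fun a j => max a (pvProd height i j)) a) ans := by
  induction l generalizing ans with
  | nil => exact le_refl ans
  | cons x xs ih => exact le_trans (foldl_max_ge_init _ _ _) (ih _)

lemma outer_ge_prod (height : List Int) (n : Int) (l : List Int) (i j : Int)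
    (hi : i ∈ l) (hj : j ∈ PySem.List.pyRange (i + 1) n 1) :
    ∀ ans, pvProd height i j ≤ l.foldl (fun a i => (PySem.List.pyRange (i + 1) n 1).foldl
        (fun a j => max a (pvProd height i j)) a) ans := by
  induction l with
  | nil => cases hi
  | cons x xs ih =>
      intro ans
      rcases List.mem_cons.mp hi with h | h
      · subst h
        simp only [List.foldl_cons]
        exact le_trans (foldl_max_ge_mem _ _ j hj _) (alt_ge_init height n xs _)
      · exact ih h _

lemma alt_ge_prod (height : List Int) (n : Int) (i j : Int)
    (h0 : 0 ≤ i) (hij : i < j) (hj : j < n) :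
    pvProd height i j ≤ maxCandy_alt height n := by
  rw [alt_eq]
  exact outer_ge_prod height n _ i j
    (by rw [PySem.List.mem_pyRange_one]; omega)
    (by rw [PySem.List.mem_pyRange_one]; omega) 0

lemma alt_ge_zero (height : List Int) (n : Int) : 0 ≤ maxCandy_alt height n := by
  rw [alt_eq]; exact alt_ge_init height n _ 0

lemma alt_le (height : List Int) (n : Int) (c : Int) (h0 : 0 ≤ c)
    (hp : ∀ i j, 0 ≤ i → i < j → j < n → pvProd height i j ≤ c) :
    maxCandy_alt height n ≤ c := by
  rw [alt_eq]
  have step : ∀ (l : List Int), (∀ i ∈ l, 0 ≤ i ∧ i < n) → ∀ (ans : Int), ans ≤ c →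
      l.foldl (fun a i => (PySem.List.pyRange (i + 1) n 1).foldl
        (fun a j => max a (pvProd height i j)) a) ans ≤ c := by
    intro l
    induction l with
    | nil => exact fun _ ans hans => hans
    | cons x xs ih =>
        intro hmem ans hans
        refine ih (fun i hi => hmem i (List.mem_cons_of_mem _ hi)) _ ?_
        refine foldl_max_le _ _ _ ?_ _ hans
        intro j hjmem
        rw [PySem.List.mem_pyRange_one] at hjmem
        exact hp x j (hmem x List.mem_cons_self).1 (by omega) (by omega)
  refine step _ ?_ 0 h0
  intro i hi; rw [PySem.List.mem_pyRange_one] at hi; omega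

-- ===== VERDICT (by name: the statement is the Claim_ definition above) =====
theorem maxCandy_spec : Claim_equal_maxCandy := by
  intro height n _ _
  unfold Spec_maxCandy maxCandy
  by_cases hn : n = 1 ∨ n = 2
  · -- A returns 0; B's loops produce no pair of positive width for n ≤ 2
    rw [if_pos hn]
    refine (le_antisymm (alt_le height n 0 le_rfl ?_) (alt_ge_zero height n)).symm
    intro i j h0 hij hj
    have hw : j - i - 1 = 0 := by omega
    unfold pvProd; rw [hw, zero_mul]
  · rw [if_neg hn]
    apply le_antisymm
    · exact loop_le height 0 (n - 1) 0 _ (alt_ge_zero height n)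
        (fun i j hi hij hj => alt_ge_prod height n i j hi hij (by omega))
    · exact alt_le height n _ (loop_ge_ans height 0 (n - 1) 0)
        (fun i j hi hij hj => loop_ge_prod height 0 (n - 1) 0 le_rfl i j hi hij (by omega))
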